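-- pv_equiv track=rewrite | github.com/Nurali004/list_search | find08_min_count.py | find_min_count
-- ===== SOURCE A (Python) =====
-- def find_min_count(data):
--     """
--     Given the list of numbers, Find count of minimum numbers in the list
--     args:
--         data: list of numbers
--     returns: count of minimum numbers in the list
--     """
--     min_num=data[0]
--     count=0
--     for num in data:
--         if num < min_num:
--             min_num=num
--             count=1
--         elif num ==min_num:
--             count +=1
--
--     return count
-- ===== SOURCE B (Python) =====
-- def find_min_count(data):
--     """
--     Given the list of numbers, Find count of minimum numbers in the list
--     args:
--         data: list of numbers
--     returns: count of minimum numbers in the list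
--     """
--     m = min(data)
--     return data.count(m)
-- ===== Notes on version B (the rewrite author's own statement) =====
-- stated objective: idiomatic
-- what changed: Replaces the fused single-pass min-tracking loop (which resets the counter whenever a new minimum appears) with the idiomatic two-pass min(data) followed by data.count(m); the running count state disappears.
import Mathlib
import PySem

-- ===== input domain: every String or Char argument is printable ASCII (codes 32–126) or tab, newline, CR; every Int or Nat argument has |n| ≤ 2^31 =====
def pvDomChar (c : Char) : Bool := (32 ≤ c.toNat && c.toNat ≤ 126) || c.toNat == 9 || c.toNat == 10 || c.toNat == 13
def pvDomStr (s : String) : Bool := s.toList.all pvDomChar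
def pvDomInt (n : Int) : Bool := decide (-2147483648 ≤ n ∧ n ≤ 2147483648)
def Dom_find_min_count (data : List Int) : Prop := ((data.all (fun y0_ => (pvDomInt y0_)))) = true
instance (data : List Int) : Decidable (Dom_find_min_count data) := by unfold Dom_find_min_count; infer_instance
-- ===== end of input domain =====

-- B replaces A's fused min-tracking loop by the idiomatic two-pass min(data) + data.count(m).

-- ===== PORT A =====
-- A's loop body: track (min_num, count); a strictly smaller element resets count to 1.
def find_min_count (data : List Int) : Int :=
  match PySem.List.pyGet? data 0 with
  | none => 0  -- unreachable under Pre_ (Python raises IndexError on [])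
  | some m0 =>
    (data.foldl (fun (s : Int × Int) num =>
      if num < s.1 then (num, 1)
      else if num == s.1 then (s.1, s.2 + 1)
      else s) (m0, 0)).2

-- ===== PORT B =====
def find_min_count_alt (data : List Int) : Int :=
  match PySem.List.min? data (fun x => x) with
  | none => 0  -- unreachable under Pre_ (Python raises ValueError on [])
  | some m => (PySem.List.count data m : Int)

-- ===== PRECONDITION & SPEC =====
-- A raises IndexError (data[0]) on the empty list; B raises ValueError (min of empty).
def Pre_find_min_count (data : List Int) : Prop := data ≠ []
instance (data : List Int) : Decidable (Pre_find_min_count data) := by unfold Pre_find_min_count; infer_instance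
def pvWitness_find_min_count : List Int := ([3, 1, 1, 2])
def Spec_find_min_count (data : List Int) (out : Int) : Prop := out = find_min_count_alt data
instance (data : List Int) (out : Int) : Decidable (Spec_find_min_count data out) := by unfold Spec_find_min_count; infer_instance

-- ===== CLAIM =====
def Claim_equal_find_min_count : Prop := ∀ (data : List Int), Dom_find_min_count data → Pre_find_min_count data → Spec_find_min_count data (find_min_count data)

-- ===== LEMMAS AND PROOFS =====

theorem foldl_min_le (t : List Int) (m : Int) : t.foldl min m ≤ m := by
  induction t generalizing m with
  | nil => simp
  | cons x t ih => exact le_trans (ih (min m x)) (min_le_left m x)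

-- Invariant of A's fold: the first component is the running minimum, the second counts
-- its occurrences in the processed suffix, plus c if the minimum never improved.
theorem foldA_inv (l : List Int) (m c : Int) :
    l.foldl (fun (s : Int × Int) num =>
      if num < s.1 then (num, 1)
      else if num == s.1 then (s.1, s.2 + 1)
      else s) (m, c)
    = (l.foldl min m,
       (if l.foldl min m = m then c else 0) + (l.count (l.foldl min m) : Int)) := by
  induction l generalizing m c with
  | nil => simp
  | cons x t ih =>
    simp only [List.foldl_cons, List.count_cons]
    by_cases h1 : x < m
    · rw [if_pos h1, ih]
      have hm : min m x = x := by omega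
      have hle : t.foldl min x ≤ x := foldl_min_le t _
      have hne : t.foldl min x ≠ m := by omega
      simp only [hm]
      by_cases h2 : t.foldl min x = x
      · simp [h2, hne, add_comm]; omega
      · simp [h2, hne, beq_iff_eq]; omega
    · rw [if_neg h1]
      have hm : min m x = m := by omega
      by_cases h2 : x = m
      · rw [if_pos (by simpa using h2), ih]; simp only [hm]
        by_cases h3 : t.foldl min m = m
        · simp [h3, h2, beq_iff_eq]; ring
        · have : ¬ (x = t.foldl min m) := by rw [h2]; exact fun hh => h3 hh.symm
          simp [h3, this, beq_iff_eq]
      · rw [if_neg (by simpa using h2), ih]; simp only [hm]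
        have hle : t.foldl min m ≤ m := foldl_min_le t _
        by_cases h3 : t.foldl min m = m
        · have : ¬ (x = t.foldl min m) := by rw [h3]; exact h2
          simp [h3, this, beq_iff_eq]; omega
        · have : ¬ (x = t.foldl min m) := by intro hh; omega
          simp [h3, this, beq_iff_eq]

-- ===== VERDICT =====
theorem find_min_count_spec : Claim_equal_find_min_count := by
  intro data _ hpre
  unfold Spec_find_min_count find_min_count find_min_count_alt
  match data, hpre with
  | x :: t, _ =>
    rw [PySem.List.min?_id_cons]
    simp only [PySem.List.pyGet?_zero_cons, List.foldl_cons]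
    have hx : ¬ (x < x) := lt_irrefl x
    rw [if_neg hx, if_pos (by simp), foldA_inv]
    have hle : t.foldl min x ≤ x := foldl_min_le t _
    simp only [PySem.List.count_eq, List.count_cons, beq_iff_eq]
    by_cases h3 : t.foldl min x = x
    · simp [h3]; ring
    · have : ¬ (x = t.foldl min x) := fun hh => h3 hh.symm
      simp [h3, this]
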